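-- pv_equiv track=rewrite | github.com/iisaduan/toRNAdo | algs/nussinov.py | count_matched_basepairs
-- ===== SOURCE A (Python) =====
-- def count_matched_basepairs(folding: list) -> list:
--     """Returns an array that tells how many matched pairs there are in the
--     folding for each substring of the RNA sequence
--
--     Args:
--         folding (list): a folding of the RNA sequence
--
--     Returns:
--         list: a 2D array dp where dp[i][j] stores the number of matched pairs
--             in folding that are entirely contained in rna[i,j+1]
--     """
--     N = len(folding)
--     dp = [[0 for j in range(N)] for i in range(N+1)]
--     for start in reversed(range(0, N)):
--         for end in range(0, N):
--             pair_index = folding[start]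
--             is_start_pair_contained = start < pair_index <= end
--             dp[start][end] = dp[start+1][end] + int(is_start_pair_contained)
--     return dp
-- ===== SOURCE B (Python) =====
-- def count_matched_basepairs(folding: list) -> list:
--     """Same table as A, computed by maintaining a histogram of pair endpoints
--     seen so far (bottom-up in i) and taking its prefix sums along j."""
--     N = len(folding)
--     dp = [[0] * N for _ in range(N + 1)]
--     ends = [0] * N  # ends[p] = number of k >= i with k < folding[k] == p < N
--     for i in range(N - 1, -1, -1):
--         p = folding[i]
--         if i < p < N:
--             ends[p] += 1
--         run = 0
--         row = dp[i]
--         for j in range(N):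
--             run += ends[j]
--             row[j] = run
--     return dp
-- ===== Notes on version B (the rewrite author's own statement) =====
-- stated objective: alternative
-- what changed: Replaces A's per-cell DP recurrence dp[i][j] = dp[i+1][j] + indicator (each row derived entry-wise from the row below) by maintaining a histogram of pair endpoints seen so far while sweeping i bottom-up, and producing each row as the running prefix sum of that histogram along j.
import Mathlib
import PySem

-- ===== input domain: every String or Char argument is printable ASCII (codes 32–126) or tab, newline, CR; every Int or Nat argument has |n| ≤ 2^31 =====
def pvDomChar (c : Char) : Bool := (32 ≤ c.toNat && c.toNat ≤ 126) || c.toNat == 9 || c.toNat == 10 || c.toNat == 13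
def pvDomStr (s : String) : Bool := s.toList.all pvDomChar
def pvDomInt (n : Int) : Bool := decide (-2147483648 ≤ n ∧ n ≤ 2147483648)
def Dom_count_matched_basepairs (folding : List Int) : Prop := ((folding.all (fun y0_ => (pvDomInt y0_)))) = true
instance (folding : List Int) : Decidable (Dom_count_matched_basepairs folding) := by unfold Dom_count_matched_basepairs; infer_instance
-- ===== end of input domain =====

-- B replaces A's row-to-row DP recurrence by a maintained histogram of pair endpoints
-- plus a prefix-sum sweep per row (objective: alternative decomposition, same O(N²) cost).

-- ===== PORT A =====
-- `[0 for j in range(N)]` (shared by both ports' table initialisation)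
def cmZeroRow (N : Nat) : List Int := (List.range N).map (fun _ => (0 : Int))

-- A's inner loop `for end in range(0, N): dp[start][end] = dp[start+1][end] + int(...)`.
-- `reversed(range(0, N))` is ported as `(List.range N).reverse`; Python's list indices
-- here are always the Nat loop variables 0..N-1 resp. start+1 ≤ N, so Nat indexing with
-- getD is exact (no negative/out-of-range index ever occurs in A).
def cmInnerA (folding : List Int) (N s : Nat) (dp : List (List Int)) : List (List Int) :=
  (List.range N).foldl (fun dp e =>
    dp.set s ((dp.getD s []).set e
      ((dp.getD (s+1) []).getD e 0 +
        (if (s : Int) < folding.getD s 0 ∧ folding.getD s 0 ≤ (e : Int) then 1 else 0)))) dp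

def count_matched_basepairs (folding : List Int) : List (List Int) :=
  ((List.range folding.length).reverse).foldl
    (fun dp start => cmInnerA folding folding.length start dp)
    ((List.range (folding.length + 1)).map (fun _ => cmZeroRow folding.length))

-- ===== PORT B =====
-- One step of B's outer loop `for i in range(N-1, -1, -1)` (state: the table and the
-- `ends` histogram).  `ends[p] += 1` is guarded by `i < p < N`, so p > i ≥ 0 and
-- `p.toNat` is exact.
def cmStepB (folding : List Int) (N : Nat) (st : List (List Int) × List Int) (i : Nat) :
    List (List Int) × List Int :=
  let p := folding.getD i 0
  let ends := if (i : Int) < p ∧ p < (N : Int) then st.2.set p.toNat (st.2.getD p.toNat 0 + 1) else st.2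
  let row := ((List.range N).foldl (fun rr j =>
      (rr.1 + ends.getD j 0, rr.2.set j (rr.1 + ends.getD j 0))) ((0 : Int), st.1.getD i [])).2
  (st.1.set i row, ends)

def count_matched_basepairs_alt (folding : List Int) : List (List Int) :=
  (((List.range folding.length).reverse).foldl (cmStepB folding folding.length)
    ((List.range (folding.length + 1)).map (fun _ => cmZeroRow folding.length),
      cmZeroRow folding.length)).1

-- ===== PRECONDITION & SPEC =====
def Spec_count_matched_basepairs (folding : List Int) (out : List (List Int)) : Prop := out = count_matched_basepairs_alt folding
instance (folding : List Int) (out : List (List Int)) : Decidable (Spec_count_matched_basepairs folding out) := by unfold Spec_count_matched_basepairs; infer_instance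

-- ===== CLAIM (what is proved, stated in full; the proofs are below) =====
def Claim_equal_count_matched_basepairs : Prop := ∀ (folding : List Int), Dom_count_matched_basepairs folding → Spec_count_matched_basepairs folding (count_matched_basepairs folding)

-- ===== LEMMAS AND PROOFS =====

-- the common specification: cmCnt i j = #{k | i ≤ k ∧ k < folding[k] ≤ j}
def cmF (folding : List Int) (k : Nat) : Int := folding.getD k 0
def cmCnt (folding : List Int) (i j : Nat) : Int :=
  ((List.range folding.length).countP
    (fun k => decide (i ≤ k ∧ (k : Int) < cmF folding k ∧ cmF folding k ≤ (j : Int))) : Nat)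
def cmCol (folding : List Int) (i p : Nat) : Int :=
  ((List.range folding.length).countP
    (fun k => decide (i ≤ k ∧ (k : Int) < cmF folding k ∧ cmF folding k = (p : Int))) : Nat)
def cmRow (folding : List Int) (i : Nat) : List Int :=
  (List.range folding.length).map (fun j => cmCnt folding i j)
def cmTableA (folding : List Int) (t : Nat) : List (List Int) :=
  (List.range (folding.length + 1)).map
    (fun i => if t ≤ i then cmRow folding i else cmZeroRow folding.length)
def cmTableB (folding : List Int) (t : Nat) : List (List Int) :=
  (List.range (folding.length + 1)).map
    (fun i => if t ≤ i ∧ i < folding.length then cmRow folding i else cmZeroRow folding.length)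
def cmEnds (folding : List Int) (t : Nat) : List Int :=
  (List.range folding.length).map (fun p => cmCol folding t p)
def cmPsum (E : List Int) (m : Nat) : Int := ((List.range m).map (fun p => E.getD p 0)).sum

-- small generic helpers
theorem cm_getD_map_range {α : Type} (g : Nat → α) (d : α) (n k : Nat) (h : k < n) :
    ((List.range n).map g).getD k d = g k := by
  rw [List.getD_eq_getElem?_getD, List.getElem?_map, List.getElem?_range h]
  rfl

theorem cm_zeroRow_length (N : Nat) : (cmZeroRow N).length = N := by
  simp [cmZeroRow]

theorem cm_getD_set_ne {α : Type} (l : List α) (i j : Nat) (v d : α) (h : i ≠ j) :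
    (l.set i v).getD j d = l.getD j d := by
  rw [List.getD_eq_getElem?_getD, List.getD_eq_getElem?_getD, List.getElem?_set_ne h]

theorem cm_getD_set_self {α : Type} (l : List α) (i : Nat) (v d : α) (h : i < l.length) :
    (l.set i v).getD i d = v := by
  rw [List.getD_eq_getElem?_getD, List.getElem?_set_self]
  all_goals first | exact h | rfl

theorem cm_set_getD_self {α : Type} (l : List α) (i : Nat) (d : α) (h : i < l.length) :
    l.set i (l.getD i d) = l := by
  apply List.ext_getElem
  · simp
  · intro k h1 h2
    rw [List.getElem_set]
    split
    · next heq => subst heq; rw [List.getD_eq_getElem?_getD, List.getElem?_eq_getElem h]; rfl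
    · rfl

-- generic counting lemmas
theorem cm_countP_le_split (P : Nat → Prop) [DecidablePred P] (s n : Nat) :
    (List.range n).countP (fun k => decide (s ≤ k ∧ P k))
      = (List.range n).countP (fun k => decide (s+1 ≤ k ∧ P k))
        + (if s < n ∧ P s then 1 else 0) := by
  induction n with
  | zero => simp
  | succ n ih =>
    rw [List.range_succ, List.countP_append, List.countP_append, ih]
    have h1 : List.countP (fun k => decide (s ≤ k ∧ P k)) [n] = if s ≤ n ∧ P n then 1 else 0 := by
      simp [List.countP_cons]
    have h2 : List.countP (fun k => decide (s+1 ≤ k ∧ P k)) [n] = if s+1 ≤ n ∧ P n then 1 else 0 := by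
      simp [List.countP_cons]
    rw [h1, h2]
    rcases eq_or_ne s n with rfl | hsn
    · by_cases hP : P s <;> simp [hP]
    · by_cases hP : P n <;> by_cases hPs : P s <;> simp [hP, hPs] <;> split_ifs <;> omega

theorem cm_countP_int_split (l : List Nat) (Q : Nat → Prop) [DecidablePred Q]
    (g : Nat → Int) (j : Int) :
    l.countP (fun k => decide (Q k ∧ g k ≤ j + 1))
      = l.countP (fun k => decide (Q k ∧ g k ≤ j)) + l.countP (fun k => decide (Q k ∧ g k = j + 1)) := by
  induction l with
  | nil => simp
  | cons a l ih =>
    simp only [List.countP_cons, ih]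
    by_cases hQ : Q a <;> simp only [hQ, true_and, false_and, decide_false] <;>
      split_ifs <;> simp_all <;> omega

theorem cm_countP_iff (l : List Nat) (p q : Nat → Prop) [DecidablePred p] [DecidablePred q]
    (h : ∀ k, p k ↔ q k) :
    l.countP (fun k => decide (p k)) = l.countP (fun k => decide (q k)) := by
  apply List.countP_congr
  intro a _
  simp [decide_eq_decide.mpr (h a)]

theorem cmCnt_zero (folding : List Int) (i : Nat) :
    cmCnt folding i 0 = cmCol folding i 0 := by
  unfold cmCnt cmCol
  congr 1
  apply cm_countP_iff
  intro k
  constructor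
  · rintro ⟨h1, h2, h3⟩; exact absurd h3 (by push_cast; omega)
  · rintro ⟨h1, h2, h3⟩; exact absurd h3 (by push_cast; omega)

theorem cmCnt_succ (folding : List Int) (i j : Nat) :
    cmCnt folding i (j+1) = cmCnt folding i j + cmCol folding i (j+1) := by
  unfold cmCnt cmCol
  have h := cm_countP_int_split (List.range folding.length)
    (fun k => i ≤ k ∧ (k : Int) < cmF folding k) (fun k => cmF folding k) (j : Int)
  push_cast
  rw [cm_countP_iff _ _ (fun k => (i ≤ k ∧ (k : Int) < cmF folding k) ∧ cmF folding k ≤ (j:Int) + 1) (by tauto),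
      cm_countP_iff _ (fun k => i ≤ k ∧ (k : Int) < cmF folding k ∧ cmF folding k ≤ (j:Int)) (fun k => (i ≤ k ∧ (k : Int) < cmF folding k) ∧ cmF folding k ≤ (j:Int)) (by tauto),
      cm_countP_iff _ (fun k => i ≤ k ∧ (k : Int) < cmF folding k ∧ cmF folding k = (j:Int) + 1) (fun k => (i ≤ k ∧ (k : Int) < cmF folding k) ∧ cmF folding k = (j:Int) + 1) (by tauto)]
  push_cast [h]
  ring

theorem cmCnt_rec (folding : List Int) (s j : Nat) (hs : s < folding.length) :
    cmCnt folding s j = cmCnt folding (s+1) j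
      + (if (s : Int) < cmF folding s ∧ cmF folding s ≤ (j : Int) then 1 else 0) := by
  unfold cmCnt
  rw [cm_countP_le_split (fun k => (k : Int) < cmF folding k ∧ cmF folding k ≤ (j : Int)) s
      folding.length]
  simp only [hs, true_and]
  split_ifs <;> push_cast <;> ring

theorem cmCol_rec (folding : List Int) (s p : Nat) (hs : s < folding.length) :
    cmCol folding s p = cmCol folding (s+1) p
      + (if (s : Int) < cmF folding s ∧ cmF folding s = (p : Int) then 1 else 0) := by
  unfold cmCol
  rw [cm_countP_le_split (fun k => (k : Int) < cmF folding k ∧ cmF folding k = (p : Int)) s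
      folding.length]
  simp only [hs, true_and]
  split_ifs <;> push_cast <;> ring

theorem cmCnt_len (folding : List Int) (j : Nat) : cmCnt folding folding.length j = 0 := by
  unfold cmCnt
  rw [List.countP_eq_zero.mpr]
  · rfl
  · intro k hk
    simp only [List.mem_range] at hk
    simp only [decide_eq_true_eq, not_and]
    intro h
    omega

theorem cmCol_len (folding : List Int) (p : Nat) : cmCol folding folding.length p = 0 := by
  unfold cmCol
  rw [List.countP_eq_zero.mpr]
  · rfl
  · intro k hk
    simp only [List.mem_range] at hk
    simp only [decide_eq_true_eq, not_and]
    intro h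
    omega

theorem cm_rowN (folding : List Int) : cmRow folding folding.length = cmZeroRow folding.length := by
  unfold cmRow cmZeroRow
  apply List.map_congr_left
  intro j _
  exact cmCnt_len folding j

theorem cmPsum_succ (E : List Int) (m : Nat) : cmPsum E (m+1) = cmPsum E m + E.getD m 0 := by
  unfold cmPsum
  rw [List.range_succ, List.map_append, List.sum_append]
  simp

-- generic foldl/set lemmas
theorem cm_foldl_set (g : Nat → Int) (r : List Int) (m : Nat) (h : m ≤ r.length) :
    (List.range m).foldl (fun r e => r.set e (g e)) r
      = (List.range m).map g ++ r.drop m := by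
  induction m with
  | zero => simp
  | succ m ih =>
    rw [List.range_succ, List.foldl_append, List.foldl_cons, List.foldl_nil,
        ih (by omega), List.map_append, List.append_assoc]
    have hlen : ((List.range m).map g).length = m := by simp
    rw [List.set_append_right _ _ (by omega), hlen, Nat.sub_self,
        List.drop_eq_getElem_cons (show m < r.length by omega), List.set_cons_zero]
    simp

theorem cm_foldl_run (E r : List Int) (m : Nat) (h : m ≤ r.length) :
    (List.range m).foldl (fun rr j => (rr.1 + E.getD j 0, rr.2.set j (rr.1 + E.getD j 0)))
        ((0 : Int), r)
      = (cmPsum E m, (List.range m).map (fun j => cmPsum E (j+1)) ++ r.drop m) := by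
  induction m with
  | zero => simp [cmPsum]
  | succ m ih =>
    rw [List.range_succ, List.foldl_append, List.foldl_cons, List.foldl_nil,
        ih (by omega)]
    simp only
    rw [← cmPsum_succ, List.map_append, List.append_assoc]
    have hlen : ((List.range m).map (fun j => cmPsum E (j+1))).length = m := by simp
    rw [List.set_append_right _ _ (by omega), hlen, Nat.sub_self,
        List.drop_eq_getElem_cons (show m < r.length by omega), List.set_cons_zero]
    simp

-- A's inner loop only writes row s and reads rows s and s+1
theorem cm_innerA_split (folding : List Int) (s : Nat) (L : List Nat)
    (dp : List (List Int)) (hs : s < dp.length) :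
    L.foldl (fun dp e =>
      dp.set s ((dp.getD s []).set e
        ((dp.getD (s+1) []).getD e 0 +
          (if (s : Int) < folding.getD s 0 ∧ folding.getD s 0 ≤ (e : Int) then 1 else 0)))) dp
    = dp.set s (L.foldl (fun r e =>
        r.set e ((dp.getD (s+1) []).getD e 0 +
          (if (s : Int) < folding.getD s 0 ∧ folding.getD s 0 ≤ (e : Int) then 1 else 0)))
        (dp.getD s [])) := by
  induction L generalizing dp with
  | nil => rw [List.foldl_nil, List.foldl_nil, cm_set_getD_self _ _ _ hs]
  | cons e L ih =>
    rw [List.foldl_cons, List.foldl_cons]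
    rw [ih _ (by simpa using hs)]
    rw [cm_getD_set_ne _ _ _ _ _ (by omega : s ≠ s + 1),
        cm_getD_set_self _ _ _ _ hs, List.set_set]

theorem cm_tableA_getD (folding : List Int) (t i : Nat) (h : i < folding.length + 1) :
    (cmTableA folding t).getD i []
      = if t ≤ i then cmRow folding i else cmZeroRow folding.length := by
  unfold cmTableA
  rw [cm_getD_map_range _ _ _ _ h]

theorem cm_tableB_getD (folding : List Int) (t i : Nat) (h : i < folding.length + 1) :
    (cmTableB folding t).getD i []
      = if t ≤ i ∧ i < folding.length then cmRow folding i else cmZeroRow folding.length := by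
  unfold cmTableB
  rw [cm_getD_map_range _ _ _ _ h]

theorem cm_tableA_set (folding : List Int) (s : Nat) (_hs : s < folding.length) :
    (cmTableA folding (s+1)).set s (cmRow folding s) = cmTableA folding s := by
  unfold cmTableA
  apply List.ext_getElem
  · simp
  · intro i h1 h2
    simp only [List.length_set, List.length_map, List.length_range] at h1 h2
    rw [List.getElem_set]
    simp only [List.getElem_map, List.getElem_range]
    split
    · next heq => subst heq; rw [if_pos (le_refl s)]
    · next hne => split_ifs <;> first | rfl | omega

theorem cm_tableB_set (folding : List Int) (s : Nat) (hs : s < folding.length) :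
    (cmTableB folding (s+1)).set s (cmRow folding s) = cmTableB folding s := by
  unfold cmTableB
  apply List.ext_getElem
  · simp
  · intro i h1 h2
    simp only [List.length_set, List.length_map, List.length_range] at h1 h2
    rw [List.getElem_set]
    simp only [List.getElem_map, List.getElem_range]
    split
    · next heq => subst heq; rw [if_pos ⟨le_refl s, hs⟩]
    · next hne => split_ifs <;> first | rfl | omega

theorem cm_stepA_table (folding : List Int) (s : Nat) (hs : s < folding.length) :
    cmInnerA folding folding.length s (cmTableA folding (s+1)) = cmTableA folding s := by
  unfold cmInnerA
  rw [cm_innerA_split folding s _ _ (by simp [cmTableA]; omega)]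
  rw [cm_tableA_getD folding (s+1) (s+1) (by omega), if_pos (le_refl (s+1)),
      cm_tableA_getD folding (s+1) s (by omega), if_neg (by omega)]
  rw [cm_foldl_set _ _ _ (by rw [cm_zeroRow_length])]
  rw [List.drop_eq_nil_of_le (by rw [cm_zeroRow_length]), List.append_nil]
  have hrow : (List.range folding.length).map
      (fun e => (cmRow folding (s+1)).getD e 0 +
        (if (s : Int) < folding.getD s 0 ∧ folding.getD s 0 ≤ (e : Int) then 1 else 0))
      = cmRow folding s := by
    unfold cmRow
    apply List.map_congr_left
    intro e he
    rw [List.mem_range] at he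
    rw [cm_getD_map_range _ _ _ _ he]
    rw [cmCnt_rec folding s e hs]
    rfl
  rw [hrow, cm_tableA_set folding s hs]

theorem cm_ends_step (folding : List Int) (s : Nat) (hs : s < folding.length) :
    (if (s : Int) < folding.getD s 0 ∧ folding.getD s 0 < (folding.length : Int) then
        (cmEnds folding (s+1)).set (folding.getD s 0).toNat
          ((cmEnds folding (s+1)).getD (folding.getD s 0).toNat 0 + 1)
      else cmEnds folding (s+1)) = cmEnds folding s := by
  have hf : folding.getD s 0 = cmF folding s := rfl
  split_ifs with hc
  · obtain ⟨hc1, hc2⟩ := hc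
    have hnn : (0 : Int) ≤ folding.getD s 0 := by omega
    have hm : ((folding.getD s 0).toNat : Int) = folding.getD s 0 := Int.toNat_of_nonneg hnn
    have hmN : (folding.getD s 0).toNat < folding.length := by omega
    rw [show (cmEnds folding (s+1)).getD (folding.getD s 0).toNat 0
        = cmCol folding (s+1) (folding.getD s 0).toNat from
      cm_getD_map_range _ _ _ _ hmN]
    unfold cmEnds
    apply List.ext_getElem
    · simp
    · intro p h1 h2
      simp only [List.length_set, List.length_map, List.length_range] at h1 h2
      rw [List.getElem_set]
      simp only [List.getElem_map, List.getElem_range]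
      split
      · next heq =>
        subst heq
        rw [cmCol_rec folding s _ hs, if_pos ⟨by rw [← hf]; exact hc1, by rw [← hf]; exact hm.symm⟩]
      · next hne =>
        rw [cmCol_rec folding s p hs, if_neg]
        · ring
        · rintro ⟨_, habs⟩
          apply hne
          rw [← hf] at habs
          omega
  · unfold cmEnds
    apply List.map_congr_left
    intro p hp
    rw [List.mem_range] at hp
    rw [cmCol_rec folding s p hs, if_neg]
    · ring
    · rintro ⟨ha, hb⟩
      rw [← hf] at ha hb
      apply hc
      constructor
      · exact ha
      · omega

theorem cm_psum_cnt (folding : List Int) (s j : Nat) (hj : j < folding.length) :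
    cmPsum (cmEnds folding s) (j+1) = cmCnt folding s j := by
  induction j with
  | zero =>
    rw [cmPsum_succ]
    have : cmPsum (cmEnds folding s) 0 = 0 := by simp [cmPsum]
    rw [this, cmCnt_zero folding s]
    rw [show (cmEnds folding s).getD 0 0 = cmCol folding s 0 from cm_getD_map_range _ _ _ _ hj]
    ring
  | succ j ih =>
    rw [cmPsum_succ, ih (by omega), cmCnt_succ]
    rw [show (cmEnds folding s).getD (j+1) 0 = cmCol folding s (j+1) from
      cm_getD_map_range _ _ _ _ hj]

theorem cm_stepB_table (folding : List Int) (s : Nat) (hs : s < folding.length) :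
    cmStepB folding folding.length (cmTableB folding (s+1), cmEnds folding (s+1)) s
      = (cmTableB folding s, cmEnds folding s) := by
  unfold cmStepB
  simp only
  rw [cm_ends_step folding s hs]
  rw [cm_tableB_getD folding (s+1) s (by omega), if_neg (by omega)]
  rw [cm_foldl_run _ _ _ (le_of_eq (cm_zeroRow_length folding.length).symm)]
  simp only
  rw [List.drop_eq_nil_of_le (by rw [cm_zeroRow_length]), List.append_nil]
  have hrow : (List.range folding.length).map (fun j => cmPsum (cmEnds folding s) (j+1))
      = cmRow folding s := by
    unfold cmRow
    apply List.map_congr_left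
    intro j hjm
    rw [List.mem_range] at hjm
    exact cm_psum_cnt folding s j hjm
  rw [hrow, cm_tableB_set folding s hs]

theorem cm_outerA (folding : List Int) (s : Nat) (hs : s ≤ folding.length) :
    ((List.range s).reverse).foldl (fun dp t => cmInnerA folding folding.length t dp)
        (cmTableA folding s)
      = cmTableA folding 0 := by
  induction s with
  | zero => simp
  | succ s ih =>
    rw [List.range_succ, List.reverse_append, List.reverse_singleton, List.singleton_append,
        List.foldl_cons, cm_stepA_table folding s (by omega)]
    exact ih (by omega)

theorem cm_outerB (folding : List Int) (s : Nat) (hs : s ≤ folding.length) :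
    ((List.range s).reverse).foldl (cmStepB folding folding.length)
        (cmTableB folding s, cmEnds folding s)
      = (cmTableB folding 0, cmEnds folding 0) := by
  induction s with
  | zero => simp
  | succ s ih =>
    rw [List.range_succ, List.reverse_append, List.reverse_singleton, List.singleton_append,
        List.foldl_cons, cm_stepB_table folding s (by omega)]
    exact ih (by omega)

theorem cm_A_eq (folding : List Int) : count_matched_basepairs folding = cmTableA folding 0 := by
  unfold count_matched_basepairs
  have h0 : (List.range (folding.length + 1)).map (fun _ => cmZeroRow folding.length)
      = cmTableA folding folding.length := by
    unfold cmTableA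
    apply List.map_congr_left
    intro i hi
    rw [List.mem_range] at hi
    split_ifs with h
    · have : i = folding.length := by omega
      subst this
      exact (cm_rowN folding).symm
    · rfl
  rw [h0]
  exact cm_outerA folding folding.length le_rfl

theorem cm_B_eq (folding : List Int) : count_matched_basepairs_alt folding = cmTableB folding 0 := by
  unfold count_matched_basepairs_alt
  have h0 : (List.range (folding.length + 1)).map (fun _ => cmZeroRow folding.length)
      = cmTableB folding folding.length := by
    unfold cmTableB
    apply List.map_congr_left
    intro i hi
    rw [List.mem_range] at hi
    split_ifs with h
    · omega
    · rfl
  have h1 : cmZeroRow folding.length = cmEnds folding folding.length := by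
    unfold cmEnds cmZeroRow
    apply List.map_congr_left
    intro p _
    exact (cmCol_len folding p).symm
  rw [h0, h1, cm_outerB folding folding.length le_rfl]

theorem cm_tables_eq (folding : List Int) : cmTableA folding 0 = cmTableB folding 0 := by
  unfold cmTableA cmTableB
  apply List.map_congr_left
  intro i hi
  rw [List.mem_range] at hi
  split_ifs with h1 h2
  · rfl
  · have : i = folding.length := by omega
    subst this
    exact cm_rowN folding
  · omega
  · rfl

-- ===== VERDICT (by name: the statement is the Claim_ definition above) =====
theorem count_matched_basepairs_spec : Claim_equal_count_matched_basepairs := by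
  intro folding _
  unfold Spec_count_matched_basepairs
  rw [cm_A_eq, cm_B_eq, cm_tables_eq]
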